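-- pv_equiv track=rewrite | github.com/StephenRicher/HiCSim | workflow/scripts/plotTUactivationByTime.py | generatePairwise
-- ===== SOURCE A (Python) =====
-- from itertools import product
--
-- def generatePairwise(names):
--     names1 = []
--     names2 = []
--     names = product(names, repeat=2)
--     for name1, name2 in names:
--         names1.append(name1)
--         names2.append(name2)
--     return names1, names2
-- ===== SOURCE B (Python) =====
-- def generatePairwise(names):
--     names = list(names)
--     n = len(names)
--     names1 = [x for x in names for _ in range(n)]
--     names2 = names * n
--     return names1, names2
-- ===== Notes on version B (the rewrite author's own statement) =====
-- stated objective: idiomatic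
-- what changed: Replaces the nested pairwise iteration with block repetition (each element repeated n times) for the first column and whole-list tiling (names * n) for the second, eliminating the explicit pair loop.
import Mathlib
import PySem

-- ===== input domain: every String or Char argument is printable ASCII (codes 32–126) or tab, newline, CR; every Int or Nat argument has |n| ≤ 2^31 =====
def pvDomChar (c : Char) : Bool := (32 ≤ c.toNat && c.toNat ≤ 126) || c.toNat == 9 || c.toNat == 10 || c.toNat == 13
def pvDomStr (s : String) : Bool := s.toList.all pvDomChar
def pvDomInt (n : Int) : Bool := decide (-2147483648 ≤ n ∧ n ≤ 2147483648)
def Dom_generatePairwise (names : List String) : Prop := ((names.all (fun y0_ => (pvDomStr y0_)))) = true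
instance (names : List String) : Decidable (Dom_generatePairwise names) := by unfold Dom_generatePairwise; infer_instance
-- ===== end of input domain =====

-- ===== PORT A =====
-- B replaces the nested pair loop by block repetition and tiling (idiomatic rewrite).
def generatePairwise (names : List String) : List String × List String :=
  names.foldl
    (fun acc name1 =>
      names.foldl (fun acc2 name2 => (acc2.1 ++ [name1], acc2.2 ++ [name2])) acc)
    ([], [])

-- ===== PORT B =====
def generatePairwise_alt (names : List String) : List String × List String :=
  let n := names.length
  (names.flatMap (fun x => List.replicate n x), (List.replicate n names).flatten)

-- ===== PRECONDITION & SPEC =====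
def Spec_generatePairwise (names : List String) (out : List String × List String) : Prop := out = generatePairwise_alt names
instance (names : List String) (out : List String × List String) : Decidable (Spec_generatePairwise names out) := by unfold Spec_generatePairwise; infer_instance

-- ===== CLAIM (what is proved, stated in full; the proofs are below) =====
def Claim_equal_generatePairwise : Prop := ∀ (names : List String), Dom_generatePairwise names → Spec_generatePairwise names (generatePairwise names)

-- ===== LEMMAS AND PROOFS =====

-- inner loop: appending name1/names pairwise to the accumulator
theorem gp_inner (names : List String) (name1 : String) (a b : List String) :
    names.foldl (fun acc2 name2 => (acc2.1 ++ [name1], acc2.2 ++ [name2])) (a, b)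
      = (a ++ List.replicate names.length name1, b ++ names) := by
  induction names generalizing a b with
  | nil => simp
  | cons x xs ih =>
      simp only [List.foldl, List.length_cons, ih]
      simp [List.replicate_succ]

-- outer loop over a prefix l, inner loop over the full names
theorem gp_outer (names l : List String) (a b : List String) :
    l.foldl
      (fun acc name1 =>
        names.foldl (fun acc2 name2 => (acc2.1 ++ [name1], acc2.2 ++ [name2])) acc)
      (a, b)
    = (a ++ l.flatMap (fun x => List.replicate names.length x),
       b ++ (List.replicate l.length names).flatten) := by
  induction l generalizing a b with
  | nil => simp
  | cons x xs ih =>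
      simp only [List.foldl, gp_inner, ih, List.flatMap_cons, List.length_cons,
        List.replicate_succ, List.flatten_cons, List.append_assoc]

-- ===== VERDICT (by name: the statement is the Claim_ definition above) =====
theorem generatePairwise_spec : Claim_equal_generatePairwise := by
  intro names _
  unfold Spec_generatePairwise generatePairwise generatePairwise_alt
  simpa using gp_outer names names [] []
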